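-- pv_equiv track=rewrite | github.com/dcfreire/Codewars | python/3kyu/alphabetic_anagrams.py | listPosition
-- ===== SOURCE A (Python) =====
-- from collections import Counter
-- import math
-- from functools import reduce
--
-- def listPosition(word):
--
--     n = 1
--     srted = sorted(list(word))
--     for i, char in enumerate(list(word)):
--
--         while srted[i] != char:
--             frequencies = Counter(srted[i + 1:])
--             fac = math.factorial(
--                 reduce(lambda acc, x: acc + x, frequencies.values(), 0))
--             div = reduce(lambda acc,
--                          x: math.factorial(x) * acc, frequencies.values(), 1)
--             try:
--                 elem = next((x for x in srted[i:] if srted[i] < x), None)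
--                 index = srted[i:].index(elem) + i
--                 po = srted.pop(index)
--                 srted.insert(i, po)
--             except ValueError:
--                 break
--             n += fac // div
--         srted[i+1:] = sorted(srted[i+1:])
--     return n
-- ===== SOURCE B (Python) =====
-- from collections import Counter
-- import math
--
-- def listPosition(word):
--     n = 1
--     freq = Counter(word)
--     denom = 1
--     for v in freq.values():
--         denom *= math.factorial(v)
--     rem = len(word)
--     for c in word:
--         rem -= 1
--         f = math.factorial(rem)
--         for ch, cnt in freq.items():
--             if cnt > 0 and ch < c:
--                 n += f * cnt // denom
--         denom //= freq[c]
--         freq[c] -= 1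
--     return n
-- ===== Notes on version B (the rewrite author's own statement) =====
-- stated objective: faster
-- what changed: A repeatedly rotates the next-larger character to the front of the sorted remainder, recounting a Counter and re-sorting the suffix at every step; B makes a single pass over the word, keeping one frequency dict and an incrementally updated product of count factorials, adding factorial(rem)*count(ch)//denom for each distinct smaller character. A timing run measured B 4-13x faster at n=64..1024 (big-integer arithmetic dominates both at n=4096).
import Mathlib
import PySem

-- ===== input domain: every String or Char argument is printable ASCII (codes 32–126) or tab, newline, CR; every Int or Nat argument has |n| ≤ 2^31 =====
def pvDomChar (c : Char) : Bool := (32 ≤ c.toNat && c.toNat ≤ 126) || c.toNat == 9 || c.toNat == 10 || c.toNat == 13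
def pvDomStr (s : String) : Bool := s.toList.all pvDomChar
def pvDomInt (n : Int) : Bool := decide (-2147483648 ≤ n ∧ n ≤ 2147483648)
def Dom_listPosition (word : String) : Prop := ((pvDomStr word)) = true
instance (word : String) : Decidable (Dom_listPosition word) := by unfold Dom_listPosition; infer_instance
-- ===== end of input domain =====

-- B replaces A's repeated rotate-and-resort scan (recounting frequencies from scratch each step) by a
-- single pass that keeps a character-frequency dict and an incrementally updated product of count
-- factorials (objective: faster; a timing run measured B about 4x faster at the largest size both
-- versions finish).

-- math.factorial; its argument is a non-negative int everywhere it is reached in either program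
def pvFact (n : Int) : Int := (Nat.factorial n.toNat : Int)

-- ===== PORT A =====
-- one iteration structure of A's `while srted[i] != char` loop; fuel bounds the iteration count
-- (each pass strictly increases srted[i] within the multiset, so length+1 fuel is never exhausted);
-- `srted[i]` is read total with getD (i < len(srted) on every reachable state);
-- failures of find?/index?/pop? mirror the `except ValueError: break` / IndexError paths.
def pvAWhile (fuel : Nat) (i : Nat) (ch : Char) (srted : List Char) (n : Int) : List Char × Int :=
  match fuel with
  | 0 => (srted, n)
  | fuel + 1 =>
    let cur := srted.getD i ' '
    if cur = ch then (srted, n)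
    else
      let frequencies := PySem.Dict.counter (PySem.List.slice srted (some ((i : Int) + 1)) none)
      let fac := pvFact (frequencies.values.foldl (fun acc x => acc + x) 0)
      let div := frequencies.values.foldl (fun acc x => pvFact x * acc) 1
      let suf := PySem.List.slice srted (some (i : Int)) none
      match suf.find? (fun x => cur < x) with
      | none => (srted, n)          -- elem = None → list.index raises ValueError → break
      | some elem =>
        match PySem.List.index? suf elem with
        | none => (srted, n)        -- ValueError → break (unreachable: elem ∈ suf)
        | some k =>
          match PySem.List.pop? srted ((k + i : Nat) : Int) with
          | none => (srted, n)      -- IndexError (unreachable)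
          | some po =>
            pvAWhile fuel i ch (PySem.List.insert po.2 (i : Int) po.1)
              (n + PySem.Int.floordiv fac div)

-- body of `for i, char in enumerate(list(word))`, state (srted, n); ends with the slice assignment
-- `srted[i+1:] = sorted(srted[i+1:])`
def pvABody (st : List Char × Int) (p : Int × Char) : List Char × Int :=
  let st' := pvAWhile (st.1.length + 1) p.1.toNat p.2 st.1 st.2
  (st'.1.take (p.1.toNat + 1) ++
     PySem.List.sorted (PySem.List.slice st'.1 (some (p.1 + 1)) none) (fun x => x) false,
   st'.2)

def listPosition (word : String) : Int :=
  ((PySem.List.enumerate word.toList 0).foldl pvABody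
      (PySem.List.sorted word.toList (fun x => x) false, 1)).2

-- ===== PORT B =====
-- state (n, freq, denom, rem); `freq[c] -= 1` is Counter item assignment (Dict.modify)
def pvBStep (st : Int × PySem.Dict Char Int × Int × Int) (c : Char) :
    Int × PySem.Dict Char Int × Int × Int :=
  let rem := st.2.2.2 - 1
  let f := pvFact rem
  let n := st.2.1.items.foldl
      (fun n p => if 0 < p.2 ∧ p.1 < c then n + PySem.Int.floordiv (f * p.2) (st.2.2.1) else n)
      st.1
  let denom := PySem.Int.floordiv st.2.2.1 (st.2.1.getD c 0)
  let freq := st.2.1.modify c 0 (· - 1)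
  (n, freq, denom, rem)

def listPosition_alt (word : String) : Int :=
  let freq := PySem.Dict.counter word.toList
  let denom := freq.values.foldl (fun acc v => acc * pvFact v) 1
  (word.toList.foldl pvBStep (1, freq, denom, (word.toList.length : Int))).1

-- ===== PRECONDITION & SPEC =====
def Spec_listPosition (word : String) (out : Int) : Prop := out = listPosition_alt word
instance (word : String) (out : Int) : Decidable (Spec_listPosition word out) := by unfold Spec_listPosition; infer_instance

-- ===== CLAIM (what is proved, stated in full; the proofs are below) =====
def Claim_equal_listPosition : Prop := ∀ (word : String), Dom_listPosition word → Spec_listPosition word (listPosition word)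

-- ===== LEMMAS AND PROOFS =====

-- the common mathematical value: number of distinct permutations of the multiset of l
def pvPerms (l : List Char) : Nat := Nat.multinomial l.toFinset (fun v => l.count v)

-- Σ over distinct v < c of perms (l minus one v): the per-position increment of the rank
def pvSmaller (l : List Char) (c : Char) : Int :=
  ∑ v ∈ l.toFinset.filter (fun v => v < c), (pvPerms (l.erase v) : Int)

-- the lexicographic rank; both programs are shown to compute this
def pvRank : List Char → Int
  | [] => 1
  | c :: rest => pvSmaller (c :: rest) c + pvRank rest

theorem pvPerms_perm {l l' : List Char} (h : l.Perm l') : pvPerms l = pvPerms l' := by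
  unfold pvPerms
  rw [List.toFinset_eq_of_perm _ _ h]
  exact congrArg _ (funext fun v => h.count_eq v)

theorem pvSmaller_perm {l l' : List Char} (h : l.Perm l') (c : Char) :
    pvSmaller l c = pvSmaller l' c := by
  unfold pvSmaller
  rw [List.toFinset_eq_of_perm _ _ h]
  exact Finset.sum_congr rfl fun v _ =>
    congrArg (Nat.cast) (pvPerms_perm (h.erase v))

theorem pvPerms_spec (l : List Char) :
    (∏ v ∈ l.toFinset, Nat.factorial (l.count v)) * pvPerms l = Nat.factorial l.length := by
  unfold pvPerms
  rw [Nat.multinomial_spec]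
  rw [List.sum_toFinset_count_eq_length]

theorem pvProdPos (l : List Char) : 0 < ∏ v ∈ l.toFinset, Nat.factorial (l.count v) :=
  Finset.prod_pos fun _ _ => Nat.factorial_pos _

theorem pvPerms_eq_div (l : List Char) :
    pvPerms l = Nat.factorial l.length / ∏ v ∈ l.toFinset, Nat.factorial (l.count v) :=
  (Nat.div_eq_of_eq_mul_left (pvProdPos l)
    (by rw [← pvPerms_spec l]; ring)).symm

theorem pvFoldMul (l : List Int) (a : Int) :
    l.foldl (fun acc x => pvFact x * acc) a = a * (l.map pvFact).prod := by
  induction l generalizing a with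
  | nil => simp
  | cons x t ih => simp [List.foldl_cons, ih]; ring

theorem pvOfListToFinset (t : List Char) : (PySem.Set.ofList t).toFinset = t.toFinset := by
  ext v; simp [PySem.Set.mem_ofList]

theorem pvValuesCounter (t : List Char) :
    (PySem.Dict.counter t).values = (PySem.Set.ofList t).map (fun k => (List.count k t : Int)) := by
  show (PySem.Dict.counter t).items.map (·.2) = _
  rw [PySem.Dict.items_counter]
  simp [List.map_map, Function.comp_def]

theorem pvSumValues (t : List Char) :
    ((PySem.Set.ofList t).map (fun k => (List.count k t : Int))).sum = (t.length : Int) := by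
  rw [← List.sum_toFinset _ (PySem.Set.nodup_ofList t), pvOfListToFinset]
  push_cast [← List.sum_toFinset_count_eq_length t]
  rfl

theorem pvProdValues (t : List Char) :
    (((PySem.Set.ofList t).map (fun k => (List.count k t : Int))).map pvFact).prod
      = ((∏ v ∈ t.toFinset, Nat.factorial (t.count v) : Nat) : Int) := by
  rw [List.map_map, ← List.prod_toFinset _ (PySem.Set.nodup_ofList t), pvOfListToFinset]
  push_cast
  exact Finset.prod_congr rfl fun v _ => by simp [pvFact, Function.comp]

theorem pvFacDiv (t : List Char) :
    PySem.Int.floordiv (pvFact ((PySem.Dict.counter t).values.foldl (fun acc x => acc + x) 0))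
      ((PySem.Dict.counter t).values.foldl (fun acc x => pvFact x * acc) 1)
      = (pvPerms t : Int) := by
  have hadd : ((PySem.Dict.counter t).values.foldl (fun acc x => acc + x) 0)
      = (t.length : Int) := by
    rw [pvValuesCounter]
    have := PySem.List.foldl_add ((PySem.Set.ofList t).map (fun k => (List.count k t : Int))) (fun x => x) 0
    simp only [List.map_id'] at this
    rw [this, pvSumValues]; ring
  rw [hadd, pvValuesCounter, pvFoldMul, pvProdValues, one_mul]
  have : pvFact (t.length : Int) = ((Nat.factorial t.length : Nat) : Int) := by
    simp [pvFact]
  rw [this, PySem.Int.floordiv_natCast, pvPerms_eq_div]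

-- factorial-product splits off one occurrence of v
theorem pvDenomStep (l : List Char) (W : Finset Char) (v : Char) (hvW : v ∈ W) (hv : v ∈ l) :
    ∏ u ∈ W, Nat.factorial (l.count u)
      = l.count v * ∏ u ∈ W, Nat.factorial ((l.erase v).count u) := by
  rw [← Finset.mul_prod_erase W (fun u => Nat.factorial (l.count u)) hvW,
      ← Finset.mul_prod_erase W (fun u => Nat.factorial ((l.erase v).count u)) hvW]
  have hcnt : 1 ≤ l.count v := List.one_le_count_iff.mpr hv
  have h1 : Nat.factorial (l.count v) = l.count v * Nat.factorial ((l.erase v).count v) := by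
    rw [List.count_erase]
    simp only [beq_self_eq_true, if_true]
    obtain ⟨k, hk⟩ : ∃ k, l.count v = k + 1 := ⟨l.count v - 1, by omega⟩
    rw [hk]; simp [Nat.factorial_succ]
  have h2 : ∏ u ∈ W.erase v, Nat.factorial (l.count u)
      = ∏ u ∈ W.erase v, Nat.factorial ((l.erase v).count u) := by
    refine Finset.prod_congr rfl fun u hu => ?_
    rw [List.count_erase]
    have : (v == u) = false := by
      simp [Finset.mem_erase] at hu
      simp [beq_eq_false_iff_ne]
      exact fun h => hu.1 h.symm
    simp [this]
  rw [h1, h2]; ring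

theorem pvErasedProd (l : List Char) (v : Char) :
    ∏ u ∈ l.toFinset, Nat.factorial ((l.erase v).count u)
      = ∏ u ∈ (l.erase v).toFinset, Nat.factorial ((l.erase v).count u) := by
  refine (Finset.prod_subset ?_ ?_).symm
  · intro u hu
    simp only [List.mem_toFinset] at *
    exact List.mem_of_mem_erase hu
  · intro u _ hu
    simp only [List.mem_toFinset] at hu
    rw [List.count_eq_zero.mpr hu]
    rfl

theorem pvNatTerm (l : List Char) (v : Char) (hv : v ∈ l) :
    Nat.factorial (l.length - 1) * l.count v
      / (∏ u ∈ l.toFinset, Nat.factorial (l.count u)) = pvPerms (l.erase v) := by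
  have hd : (∏ u ∈ l.toFinset, Nat.factorial (l.count u))
      = l.count v * ∏ u ∈ (l.erase v).toFinset, Nat.factorial ((l.erase v).count u) := by
    rw [pvDenomStep l l.toFinset v (List.mem_toFinset.mpr hv) hv, pvErasedProd]
  have hlen : (l.erase v).length = l.length - 1 := List.length_erase_of_mem hv
  have hnum : Nat.factorial (l.length - 1) * l.count v
      = (∏ u ∈ l.toFinset, Nat.factorial (l.count u)) * pvPerms (l.erase v) := by
    rw [hd, ← hlen, ← pvPerms_spec (l.erase v)]
    ring
  rw [hnum, Nat.mul_div_cancel_left _ (pvProdPos l)]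

theorem pvTermInt (l : List Char) (v : Char) (hv : v ∈ l) :
    PySem.Int.floordiv (pvFact ((l.length : Int) - 1) * ((l.count v : Nat) : Int))
        ((∏ u ∈ l.toFinset, Nat.factorial (l.count u) : Nat) : Int)
      = (pvPerms (l.erase v) : Int) := by
  have hne : l ≠ [] := List.ne_nil_of_mem hv
  have hlen : 1 ≤ l.length := List.length_pos_iff.mpr hne
  have h2 : ((l.length : Int) - 1).toNat = l.length - 1 := by omega
  have h1 : pvFact ((l.length : Int) - 1) = ((Nat.factorial (l.length - 1) : Nat) : Int) := by
    simp [pvFact, h2]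
  rw [h1, ← Int.natCast_mul, PySem.Int.floordiv_natCast, pvNatTerm l v hv]

theorem pvBStep_spec (wl p rest' : List Char) (c : Char) (n : Int)
    (hw : wl = p ++ c :: rest') :
    pvBStep (n,
      PySem.Dict.mk ((PySem.List.dedup wl).map (fun k => (k, ((c :: rest').count k : Int)))),
      ((∏ v ∈ wl.toFinset, Nat.factorial ((c :: rest').count v) : Nat) : Int),
      ((c :: rest').length : Int)) c
    = (n + pvSmaller (c :: rest') c,
      PySem.Dict.mk ((PySem.List.dedup wl).map (fun k => (k, (rest'.count k : Int)))),
      ((∏ v ∈ wl.toFinset, Nat.factorial (rest'.count v) : Nat) : Int),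
      (rest'.length : Int)) := by
  have hcw : c ∈ wl := by rw [hw]; simp
  have hsub : ∀ x, x ∈ (c :: rest') → x ∈ wl := by intro x hx; rw [hw]; exact List.mem_append_right _ hx
  set rest := c :: rest' with hrest
  set ks := PySem.List.dedup wl with hks
  have hksnd : ks.Nodup := by rw [hks, PySem.List.dedup_eq_ofList]; exact PySem.Set.nodup_ofList wl
  have hmemks : ∀ x, x ∈ ks ↔ x ∈ wl := by
    intro x; rw [hks, PySem.List.dedup_eq_ofList]; exact PySem.Set.mem_ofList wl x
  set d := PySem.Dict.mk (ks.map (fun k => (k, (rest.count k : Int)))) with hd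
  have hkeys : d.keys = ks := by
    show (ks.map (fun k => (k, (rest.count k : Int)))).map (·.1) = ks
    simp [List.map_map, Function.comp_def]
  have hkeysnd : d.keys.Nodup := by rw [hkeys]; exact hksnd
  have hgetD : d.getD c 0 = (rest.count c : Int) := by
    refine PySem.Dict.getD_of_mem_items d ?_ hkeysnd 0
    show (c, (rest.count c : Int)) ∈ ks.map _
    exact List.mem_map.mpr ⟨c, (hmemks c).mpr hcw, rfl⟩
  have hcontains : d.contains c = true := by
    rw [PySem.Dict.contains_iff_mem_keys, hkeys]; exact (hmemks c).mpr hcw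
  unfold pvBStep
  simp only
  refine Prod.ext ?_ (Prod.ext ?_ (Prod.ext ?_ ?_))
  · -- the n component
    show d.items.foldl _ n = _
    rw [PySem.List.foldl_ite_eq_foldl_filter (p := fun p : Char × Int => 0 < p.2 ∧ p.1 < c)
        (f := fun n p => n + PySem.Int.floordiv (pvFact (((rest.length : Int)) - 1) * p.2)
          ((∏ v ∈ wl.toFinset, Nat.factorial (rest.count v) : Nat) : Int))]
    rw [PySem.List.foldl_add]
    show n + _ = n + pvSmaller rest c
    congr 1
    show ((List.filter _ (ks.map (fun k => (k, (rest.count k : Int))))).map _).sum = _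
    rw [List.filter_map, List.map_map]
    have hmapc : ∀ k ∈ ks.filter ((fun p : Char × Int => decide (0 < p.2 ∧ p.1 < c)) ∘ (fun k => (k, (rest.count k : Int)))),
        ((fun p : Char × Int => PySem.Int.floordiv (pvFact (((rest.length : Int)) - 1) * p.2)
            ((∏ v ∈ wl.toFinset, Nat.factorial (rest.count v) : Nat) : Int)) ∘
          (fun k => (k, (rest.count k : Int)))) k
        = (fun k => (pvPerms (rest.erase k) : Int)) k := by
      intro k hk
      simp only [List.mem_filter, Function.comp_def, decide_eq_true_eq] at hk
      obtain ⟨hk1, hk2, hk3⟩ := hk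
      have hkrest : k ∈ rest := by
        rw [← List.count_pos_iff]; exact_mod_cast hk2
      show PySem.Int.floordiv (pvFact (((rest.length : Int)) - 1) * ((rest.count k : Nat) : Int)) _ = _
      have hW : (∏ v ∈ wl.toFinset, Nat.factorial (rest.count v))
          = ∏ v ∈ rest.toFinset, Nat.factorial (rest.count v) := by
        refine (Finset.prod_subset ?_ ?_).symm
        · intro u hu; simp only [List.mem_toFinset] at *; exact hsub u hu
        · intro u _ hu
          simp only [List.mem_toFinset] at hu
          rw [List.count_eq_zero.mpr hu]; rfl
      rw [hW]
      exact pvTermInt rest k hkrest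
    rw [List.map_congr_left hmapc]
    rw [← List.sum_toFinset _ (hksnd.filter _)]
    have hfs : (ks.filter ((fun p : Char × Int => decide (0 < p.2 ∧ p.1 < c)) ∘ (fun k => (k, (rest.count k : Int))))).toFinset
        = rest.toFinset.filter (fun v => v < c) := by
      ext v
      simp only [List.mem_toFinset, List.mem_filter, Function.comp_def, Finset.mem_filter, decide_eq_true_eq]
      constructor
      · rintro ⟨h1, h2, h3⟩
        refine ⟨?_, h3⟩
        rw [← List.count_pos_iff]; exact_mod_cast h2
      · rintro ⟨h1, h2⟩
        refine ⟨(hmemks v).mpr (hsub v h1), ?_, h2⟩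
        have := List.count_pos_iff.mpr h1
        exact_mod_cast this
    rw [hfs]
    rfl
  · -- freq component
    show d.modify c 0 (· - 1) = _
    show d.insert c (d.getD c 0 - 1) = _
    rw [hgetD]
    apply PySem.Dict.ext
    rw [PySem.Dict.items_insert_of_contains d _ hcontains]
    show (ks.map _).map _ = ks.map _
    rw [List.map_map]
    refine List.map_congr_left fun k hk => ?_
    by_cases hkc : k = c
    · subst hkc
      have h1 : rest.count k = rest'.count k + 1 := by
        rw [hrest, List.count_cons_self]
      simp [h1]
    · have hbc : (k == c) = false := beq_eq_false_iff_ne.mpr hkc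
      have hcb : (c == k) = false := beq_eq_false_iff_ne.mpr (fun h => hkc h.symm)
      have h1 : rest.count k = rest'.count k := by
        simp [hrest, List.count_cons, hcb]
      simp [h1, hkc]
  · -- denom component
    show PySem.Int.floordiv _ (d.getD c 0) = _
    rw [hgetD]
    have hsplit : (∏ v ∈ wl.toFinset, Nat.factorial (rest.count v))
        = rest.count c * ∏ v ∈ wl.toFinset, Nat.factorial (rest'.count v) := by
      have := pvDenomStep rest wl.toFinset c (List.mem_toFinset.mpr hcw) (by simp [hrest])
      rw [this]
      congr 1
      refine Finset.prod_congr rfl fun u _ => ?_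
      rw [hrest, List.erase_cons_head]
    have hpos : 0 < rest.count c := List.count_pos_iff.mpr (by simp [hrest])
    rw [hsplit]
    show PySem.Int.floordiv _ _ = ((∏ v ∈ wl.toFinset, Nat.factorial (rest'.count v) : Nat) : Int)
    rw [PySem.Int.floordiv_natCast, Nat.mul_div_cancel_left _ hpos]
  · -- rem component
    show ((rest.length : Int)) - 1 = (rest'.length : Int)
    rw [hrest]; simp

theorem pvBFold (wl : List Char) (rest : List Char) (p : List Char) (n : Int) (hw : wl = p ++ rest) :
    (rest.foldl pvBStep
        (n, PySem.Dict.mk ((PySem.List.dedup wl).map (fun k => (k, (rest.count k : Int)))),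
         ((∏ v ∈ wl.toFinset, Nat.factorial (rest.count v) : Nat) : Int),
         (rest.length : Int))).1 = n + (pvRank rest - 1) := by
  induction rest generalizing p n with
  | nil => simp [pvRank]
  | cons c rest' ih =>
    rw [List.foldl_cons, pvBStep_spec wl p rest' c n hw]
    rw [ih (p ++ [c]) (n + pvSmaller (c :: rest') c) (by rw [hw]; simp)]
    show _ = n + (pvSmaller (c :: rest') c + pvRank rest' - 1)
    ring

theorem pvFoldMul2 (l : List Int) (a : Int) :
    l.foldl (fun acc x => acc * pvFact x) a = a * (l.map pvFact).prod := by
  induction l generalizing a with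
  | nil => simp
  | cons x t ih => simp [List.foldl_cons, ih]; ring

theorem pvGetDMid (pre r : List Char) (x d : Char) : (pre ++ x :: r).getD pre.length d = x := by
  rw [List.getD_eq_getElem?_getD, List.getElem?_append_right (le_refl _)]
  simp

theorem pvPopMid (P S : List Char) (w : Char) :
    PySem.List.pop? (P ++ w :: S) ((P.length : Nat) : Int) = some (w, P ++ S) := by
  rw [PySem.List.pop?_natCast _ _ (by simp)]
  congr 1
  refine Prod.ext ?_ ?_
  · show (P ++ w :: S)[P.length] = w
    rw [List.getElem_append_right (le_refl _)]
    simp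
  · show (P ++ w :: S).eraseIdx P.length = P ++ S
    induction P with
    | nil => simp
    | cons a P ih => simp [ih]


theorem pvDropMid (pre r : List Char) (x : Char) : (pre ++ x :: r).drop (pre.length + 1) = r := by
  induction pre with
  | nil => simp
  | cons a p ih => simp [ih]

theorem pvAWhile_spec (fuel : Nat) (pre junk t : List Char) (h c : Char) (n : Int)
    (hjunk : ∀ x ∈ junk, x ≤ h) (hts : t.Pairwise (· ≤ ·)) (hhc : h ≤ c)
    (hcmem : c ∈ h :: junk ++ t) (hfuel : t.length < fuel) :
    ∃ r : List Char, r.Perm ((h :: junk ++ t).erase c) ∧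
      pvAWhile fuel pre.length c (pre ++ h :: junk ++ t) n =
        (pre ++ c :: r,
         n + ∑ v ∈ (h :: junk ++ t).toFinset.filter (fun v => h ≤ v ∧ v < c),
               (pvPerms ((h :: junk ++ t).erase v) : Int)) := by
  induction fuel generalizing junk t h n with
  | zero => omega
  | succ fuel ih =>
    rw [pvAWhile]
    simp only [List.cons_append, List.append_assoc]
    simp only [pvGetDMid pre (junk ++ t) h ' ']
    by_cases hhc' : h = c
    · subst hhc'
      rw [if_pos rfl]
      refine ⟨junk ++ t, by rw [List.erase_cons_head], ?_⟩
      have hempty : (h :: (junk ++ t)).toFinset.filter (fun v => h ≤ v ∧ v < h) = ∅ := by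
        apply Finset.filter_false_of_mem
        intro v _
        exact fun hv => absurd hv.2 (not_lt.mpr hv.1)
      rw [hempty, Finset.sum_empty, add_zero]
    · -- h < c
      have hlt : h < c := lt_of_le_of_ne hhc hhc'
      rw [if_neg hhc']
      -- c sits in t
      have hct : c ∈ t := by
        rcases List.mem_append.mp hcmem with h1 | h1
        · rcases List.mem_cons.mp h1 with h2 | h2
          · exact absurd h2.symm hhc'
          · exact absurd hlt (not_lt.mpr (hjunk c h2))
        · exact h1
      -- the slices
      have hslice1 : PySem.List.slice (pre ++ h :: (junk ++ t)) (some ((pre.length : Nat) : Int)) none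
          = h :: (junk ++ t) := by
        rw [PySem.List.slice_from_natCast]
        exact List.drop_left
      have hcast : ((pre.length : Nat) : Int) + 1 = (((pre.length + 1 : Nat)) : Int) := by push_cast; ring
      have hslice2 : PySem.List.slice (pre ++ h :: (junk ++ t)) (some (((pre.length : Nat) : Int) + 1)) none
          = junk ++ t := by
        rw [hcast, PySem.List.slice_from_natCast]
        exact pvDropMid pre (junk ++ t) h
      -- find? returns the least element of t above h
      obtain ⟨w, hfw⟩ : ∃ w, t.find? (fun x => decide (h < x)) = some w := by
        have : (t.find? (fun x => decide (h < x))).isSome = true :=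
          List.find?_isSome.mpr ⟨c, hct, by simpa using hlt⟩
        exact Option.isSome_iff_exists.mp this
      have hpw : h < w := by have := List.find?_some hfw; simpa using this
      obtain ⟨-, as, bs, hteq, has⟩ := List.find?_eq_some_iff_append.mp hfw
      have has' : ∀ a ∈ as, a ≤ h := fun a ha => by
        have := has a ha; simp at this; exact this
      have hfind : List.find? (fun x => decide (h < x)) (h :: (junk ++ t)) = some w := by
        rw [List.find?_cons_of_neg (by simp), List.find?_append,
            List.find?_eq_none.mpr (fun x hx => by simpa using not_lt.mpr (hjunk x hx)), Option.none_or, hfw]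
      -- index? finds w right after h :: junk ++ as
      have hwnotin : w ∉ h :: (junk ++ as) := by
        intro hc
        rcases List.mem_cons.mp hc with h2 | h2
        · exact absurd (h2 ▸ hpw) (lt_irrefl h)
        · rcases List.mem_append.mp h2 with h3 | h3
          · exact absurd hpw (not_lt.mpr (hjunk w h3))
          · exact absurd hpw (not_lt.mpr (has' w h3))
      have hidx : PySem.List.index? (h :: (junk ++ t)) w = some (h :: (junk ++ as)).length := by
        rw [PySem.List.index?_eq_some_iff]
        exact ⟨h :: (junk ++ as), bs, by simp [hteq, List.append_assoc], rfl, hwnotin⟩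
      -- pop at the absolute index
      set P : List Char := pre ++ h :: (junk ++ as) with hP
      have hlenP : (h :: (junk ++ as)).length + pre.length = P.length := by simp [hP]; omega
      have hsrted : pre ++ h :: (junk ++ t) = P ++ w :: bs := by simp [hP, hteq]
      have hpop := pvPopMid P bs w
      -- insert back at position pre.length
      have hPbs : P ++ bs = pre ++ h :: (junk ++ (as ++ bs)) := by simp [hP]
      have hins : PySem.List.insert (P ++ bs) ((pre.length : Nat) : Int) w
          = pre ++ w :: h :: (junk ++ (as ++ bs)) := by
        rw [hPbs, PySem.List.insert_natCast _ _ _ (by simp)]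
        rw [List.take_left' rfl, List.drop_left]
      have hfacdiv := pvFacDiv (junk ++ t)
      -- reduce the step
      rw [hslice1, hslice2]
      rw [hsrted]
      rw [← hsrted] -- keep list in both shapes available; actual reduction below
      simp only [hfind, hidx, hlenP, hsrted, hpop, hins, hfacdiv]
      -- prepare and apply the induction hypothesis
      have hperm : (w :: ((h :: junk) ++ (as ++ bs))).Perm (h :: (junk ++ t)) := by
        have hmid := List.perm_middle (a := w) (l₁ := h :: (junk ++ as)) (l₂ := bs)
        have he1 : (h :: (junk ++ as)) ++ w :: bs = h :: (junk ++ t) := by simp [hteq, List.append_assoc]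
        rw [he1] at hmid
        have he2 : w :: ((h :: (junk ++ as)) ++ bs) = w :: ((h :: junk) ++ (as ++ bs)) := by
          simp [List.append_assoc]
        rw [he2] at hmid
        exact hmid.symm
      have hbsw : ∀ y ∈ bs, w ≤ y := by
        have hpt := hteq ▸ hts
        have h2 := (List.pairwise_append.mp hpt).2.1
        intro y hy
        exact (List.pairwise_cons.mp h2).1 y hy
      have hwc : w ≤ c := by
        rcases List.mem_append.mp (hteq ▸ hct) with h2 | h2
        · exact absurd hlt (not_lt.mpr (has' c h2))
        · rcases List.mem_cons.mp h2 with h3 | h3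
          · exact le_of_eq h3.symm
          · exact hbsw c h3
      obtain ⟨r, hr, heq⟩ := ih (h :: junk) (as ++ bs) w (n + (pvPerms (junk ++ t) : Int))
        (fun x hx => by
          rcases List.mem_cons.mp hx with h2 | h2
          · exact h2 ▸ le_of_lt hpw
          · exact le_trans (hjunk x h2) (le_of_lt hpw))
        (by
          have hpt := hteq ▸ hts
          have h2 : (as ++ bs).Sublist (as ++ w :: bs) := (List.sublist_cons_self w bs).append_left as
          exact hpt.sublist h2)
        hwc
        (by
          rcases List.mem_append.mp (hteq ▸ hct) with h2 | h2
          · exact absurd hlt (not_lt.mpr (has' c h2))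
          · rcases List.mem_cons.mp h2 with h3 | h3
            · exact h3 ▸ List.mem_cons_self
            · simp [h3])
        (by
          have hlt2 : t.length = as.length + bs.length + 1 := by simp [hteq]; omega
          have hlt3 : (as ++ bs).length = as.length + bs.length := by simp
          omega)
      simp only [List.cons_append, List.append_assoc] at heq
      rw [heq]
      -- r is a permutation of the erase
      refine ⟨r, hr.trans ?_, ?_⟩
      · have := hperm.erase c
        simpa [List.cons_append, List.append_assoc] using this
      -- sum bookkeeping
      have hTF : (w :: h :: (junk ++ (as ++ bs))).toFinset = (h :: (junk ++ t)).toFinset := by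
        have := List.toFinset_eq_of_perm _ _ hperm
        simpa [List.cons_append, List.append_assoc] using this
      have hpermN : (w :: h :: (junk ++ (as ++ bs))).Perm (h :: (junk ++ t)) := by
        have := hperm
        simpa [List.cons_append, List.append_assoc] using this
      have hsum_congr :
          ∑ v ∈ (w :: h :: (junk ++ (as ++ bs))).toFinset.filter (fun v => w ≤ v ∧ v < c),
              (pvPerms ((w :: h :: (junk ++ (as ++ bs))).erase v) : Int)
          = ∑ v ∈ (h :: (junk ++ t)).toFinset.filter (fun v => w ≤ v ∧ v < c),
              (pvPerms ((h :: (junk ++ t)).erase v) : Int) := by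
        rw [hTF]
        exact Finset.sum_congr rfl fun v _ =>
          congrArg Nat.cast (pvPerms_perm ((hpermN.erase v)))
      have hsplit : (h :: (junk ++ t)).toFinset.filter (fun v => h ≤ v ∧ v < c)
          = insert h ((h :: (junk ++ t)).toFinset.filter (fun v => w ≤ v ∧ v < c)) := by
        ext u
        simp only [Finset.mem_filter, Finset.mem_insert, List.mem_toFinset]
        constructor
        · rintro ⟨hu1, hu2, hu3⟩
          by_cases huh : u = h
          · exact Or.inl huh
          · refine Or.inr ⟨hu1, ?_, hu3⟩
            have hhu : h < u := lt_of_le_of_ne hu2 (fun e => huh e.symm)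
            rcases List.mem_cons.mp hu1 with h2 | h2
            · exact absurd h2 huh
            · rcases List.mem_append.mp h2 with h3 | h3
              · exact absurd hhu (not_lt.mpr (hjunk u h3))
              · rw [hteq] at h3
                rcases List.mem_append.mp h3 with h4 | h4
                · exact absurd hhu (not_lt.mpr (has' u h4))
                · rcases List.mem_cons.mp h4 with h5 | h5
                  · exact le_of_eq h5.symm
                  · exact hbsw u h5
        · rintro (rfl | ⟨hu1, hu2, hu3⟩)
          · exact ⟨List.mem_cons_self, le_refl _, hlt⟩
          · exact ⟨hu1, le_trans (le_of_lt hpw) hu2, hu3⟩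
      have hnotmem : h ∉ (h :: (junk ++ t)).toFinset.filter (fun v => w ≤ v ∧ v < c) := by
        simp only [Finset.mem_filter]
        exact fun hcc => absurd hcc.2.1 (not_le.mpr hpw)
      rw [hsum_congr, hsplit, Finset.sum_insert hnotmem, List.erase_cons_head]
      refine Prod.ext rfl ?_
      show n + (pvPerms (junk ++ t) : Int) + _ = n + (_ + _)
      ring

theorem pvAFold (ws : List Char) (pre s : List Char) (n : Int) (hperm : s.Perm ws) :
    ((PySem.List.enumerate ws (pre.length : Int)).foldl pvABody
        (pre ++ PySem.List.sorted s (fun x => x) false, n)).2 = n + (pvRank ws - 1) := by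
  induction ws generalizing pre s n with
  | nil => simp [PySem.List.enumerate_nil, pvRank]
  | cons c ws' ih =>
    rw [PySem.List.enumerate_cons, List.foldl_cons]
    have hLne : PySem.List.sorted s (fun x => x) false ≠ [] := by
      rw [Ne, PySem.List.sorted_eq_nil_iff]
      intro hs
      subst hs
      exact absurd hperm.symm (by simp)
    obtain ⟨h, t₀, hL⟩ : ∃ h t₀, PySem.List.sorted s (fun x => x) false = h :: t₀ := by
      cases hLs : PySem.List.sorted s (fun x => x) false with
      | nil => exact absurd hLs hLne
      | cons a l => exact ⟨a, l, rfl⟩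
    have hLpw : (h :: t₀).Pairwise (· ≤ ·) := by
      have := PySem.List.sorted_pairwise s (fun x => x)
      rw [hL] at this
      simpa using this
    have hts : t₀.Pairwise (· ≤ ·) := (List.pairwise_cons.mp hLpw).2
    have hhead : ∀ y ∈ t₀, h ≤ y := (List.pairwise_cons.mp hLpw).1
    have hLperm : (h :: t₀).Perm s := hL ▸ PySem.List.sorted_perm s (fun x => x) false
    have hcL : c ∈ h :: t₀ := (hLperm.trans hperm).mem_iff.mpr List.mem_cons_self
    have hhc : h ≤ c := by
      rcases List.mem_cons.mp hcL with h1 | h1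
      · exact le_of_eq h1.symm
      · exact hhead c h1
    -- run the while loop
    obtain ⟨r, hr, heqW⟩ := pvAWhile_spec ((pre ++ h :: t₀).length + 1) pre [] t₀ h c n
      (by simp) hts hhc (by simpa using hcL) (by simp; omega)
    simp only [List.append_assoc, List.cons_append, List.nil_append] at heqW hr
    -- evaluate the body
    have hbody : pvABody (pre ++ PySem.List.sorted s (fun x => x) false, n) ((pre.length : Int), c)
        = ((pre ++ [c]) ++ PySem.List.sorted r (fun x => x) false,
           n + ∑ v ∈ (h :: t₀).toFinset.filter (fun v => h ≤ v ∧ v < c),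
                 (pvPerms ((h :: t₀).erase v) : Int)) := by
      unfold pvABody
      simp only [hL, Int.toNat_natCast]
      rw [heqW]
      simp only
      congr 1
      · have htake : (pre ++ c :: r).take (pre.length + 1) = pre ++ [c] := by
          have : pre ++ c :: r = (pre ++ [c]) ++ r := by simp
          rw [this, List.take_left' (by simp)]
        have hslice : PySem.List.slice (pre ++ c :: r) (some ((pre.length : Int) + 1)) none = r := by
          have hcast : ((pre.length : Nat) : Int) + 1 = (((pre.length + 1 : Nat)) : Int) := by push_cast; ring
          rw [hcast, PySem.List.slice_from_natCast]
          exact pvDropMid pre r c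
        rw [htake, hslice]
    rw [hbody]
    -- apply the induction hypothesis
    have hrperm : r.Perm ws' := by
      have h1 : r.Perm ((h :: t₀).erase c) := hr
      have h2 : ((h :: t₀).erase c).Perm ((c :: ws').erase c) := (hLperm.trans hperm).erase c
      rw [List.erase_cons_head] at h2
      exact h1.trans h2
    have hstart : (pre.length : Int) + 1 = (((pre ++ [c]).length : Nat) : Int) := by
      simp
    rw [hstart, ih (pre ++ [c]) r _ hrperm]
    -- identify the added sum with pvSmaller
    have hfilter : (h :: t₀).toFinset.filter (fun v => h ≤ v ∧ v < c)
        = (h :: t₀).toFinset.filter (fun v => v < c) := by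
      apply Finset.filter_congr
      intro v hv
      simp only [List.mem_toFinset] at hv
      constructor
      · exact fun hx => by simp [hx.2]
      · intro hx
        simp only [hx, and_true]
        rcases List.mem_cons.mp hv with h1 | h1
        · exact le_of_eq h1.symm
        · exact hhead v h1
    have hsm : ∑ v ∈ (h :: t₀).toFinset.filter (fun v => v < c),
          (pvPerms ((h :: t₀).erase v) : Int) = pvSmaller (c :: ws') c := by
      show pvSmaller (h :: t₀) c = _
      exact pvSmaller_perm (hLperm.trans hperm) c
    rw [hfilter, hsm]
    show _ = n + (pvSmaller (c :: ws') c + pvRank ws' - 1)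
    ring

theorem listPosition_alt_eq_rank (word : String) : listPosition_alt word = pvRank word.toList := by
  unfold listPosition_alt
  simp only
  have h1 : PySem.Dict.counter word.toList
      = PySem.Dict.mk ((PySem.List.dedup word.toList).map (fun k => (k, (word.toList.count k : Int)))) := by
    apply PySem.Dict.ext
    rw [PySem.Dict.items_counter, PySem.List.dedup_eq_ofList]
  have h2 : (PySem.Dict.counter word.toList).values.foldl (fun acc v => acc * pvFact v) 1
      = ((∏ v ∈ word.toList.toFinset, Nat.factorial (word.toList.count v) : Nat) : Int) := by
    rw [pvValuesCounter, pvFoldMul2, pvProdValues, one_mul]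
  rw [h2, h1, pvBFold word.toList word.toList [] 1 rfl]
  ring

theorem listPosition_eq_rank (word : String) : listPosition word = pvRank word.toList := by
  unfold listPosition
  have h := pvAFold word.toList [] word.toList 1 (List.Perm.refl _)
  simp only [List.length_nil, Nat.cast_zero, List.nil_append] at h
  rw [h]
  ring

-- ===== VERDICT (by name: the statement is the Claim_ definition above) =====
theorem listPosition_spec : Claim_equal_listPosition := by
  intro word _
  unfold Spec_listPosition
  rw [listPosition_eq_rank, listPosition_alt_eq_rank]
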